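-- pv_equiv track=rewrite | github.com/bbyrd2021/projects | blbyrd_VowelCount.py | sometimesY
-- ===== SOURCE A (Python) =====
-- vowels = 'aeiou' #will be used in line 39 to count y's
--
-- def lastConsonant(word): #function to find the last consonant in a word
--   rstr = word[::-1]
--   for letter in rstr:
--     if ((not letter in vowels) and (letter != 'y')) and letter.isalpha():
--       return (rstr.index(letter)+1) * -1
--
-- def lastVowel(word): #function to find the last vowel in a word
--   rstr = word[::-1]
--   for letter in rstr:
--     if ((letter in vowels) and (letter != 'y')) and letter.isalpha():
--       return (rstr.index(letter)+1) * -1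
--
-- def sometimesY(thisList): #funtion to count y's based on certain conditions
--   if thisList == []:
--     return 0 #base case
--   elif 'y' in thisList[0]: #word has a y?
--     if not any(char in vowels for char in thisList[0]): #if there is no other vowel in the word
--       return 1 + sometimesY(thisList[1:])
--     elif thisList[0][-1] == 'y': #if y is the last letter in the word
--       return 1 + sometimesY(thisList[1:])
--     elif thisList[0][0] == 'y': #if y is the first letter in the word after the other cases are true, i will not count it. the rest won't execute because its not applicable
--       return sometimesY(thisList[1:]) #onto the next word
--     elif (thisList[0][lastConsonant(thisList[0])+1]) == 'y': #if y follows the last consonant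
--       return 1 + sometimesY(thisList[1:])
--     elif (thisList[0][lastVowel(thisList[0])+1]) == 'y': #if y follows the last vowel
--       return 1 + sometimesY(thisList[1:])
--     else: #on to the next word
--       return sometimesY(thisList[1:])
--   else: #on to the next word
--     return sometimesY(thisList[1:])
-- ===== SOURCE B (Python) =====
-- # B: iterative count with a boolean per-word predicate; last consonant/vowel found by a
-- # single forward max-index scan instead of A's reversed-string + .index recursion.
-- # Where A raises TypeError (word with 'y' and a vowel, not starting/ending in 'y',
-- # containing no other consonant), B returns a count instead (outside Pre_).
-- VOWELS = 'aeiou'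
--
-- def _counts(word):
--     if 'y' not in word:
--         return False
--     if not any(c in VOWELS for c in word):
--         return True
--     if word[-1] == 'y':
--         return True
--     if word[0] == 'y':
--         return False
--     lc = max((i for i, c in enumerate(word) if c.isalpha() and c not in VOWELS and c != 'y'), default=None)
--     if lc is not None and lc + 1 < len(word) and word[lc + 1] == 'y':
--         return True
--     lv = max((i for i, c in enumerate(word) if c in VOWELS), default=None)
--     return lv is not None and lv + 1 < len(word) and word[lv + 1] == 'y'
--
-- def sometimesY(thisList):
--     count = 0
--     for word in thisList:
--         if _counts(word):
--             count += 1
--     return count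
-- ===== Notes on version B (the rewrite author's own statement) =====
-- stated objective: simpler
-- what changed: B replaces A's recursion-with-list-slicing and reversed-string + .index() helper scans by a single accumulator loop over a per-word boolean predicate whose last-consonant/last-vowel positions come from a forward max-index scan with an explicit bounds check instead of negative-index arithmetic; dropping the thisList[1:] copies also makes B asymptotically faster in the list length.
import Mathlib
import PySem

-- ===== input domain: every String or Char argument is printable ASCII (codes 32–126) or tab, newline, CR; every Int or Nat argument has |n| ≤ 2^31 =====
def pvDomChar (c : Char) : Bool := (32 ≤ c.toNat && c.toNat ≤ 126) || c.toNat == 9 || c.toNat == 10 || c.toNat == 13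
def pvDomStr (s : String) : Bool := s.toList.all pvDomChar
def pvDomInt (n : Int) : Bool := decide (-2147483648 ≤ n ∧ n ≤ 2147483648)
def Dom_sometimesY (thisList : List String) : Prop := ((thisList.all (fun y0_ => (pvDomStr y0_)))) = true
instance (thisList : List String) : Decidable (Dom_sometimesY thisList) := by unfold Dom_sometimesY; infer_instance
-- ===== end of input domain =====

-- B replaces A's recursive slicing and reversed-string + .index consonant/vowel search by an
-- accumulator loop over a per-word boolean predicate whose last-consonant / last-vowel positions
-- come from a forward max-index scan (objective: simpler; a timing run also measured B faster,
-- as B does not copy thisList[1:] per step). Where the Python A raises TypeError (excluded by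
-- Pre_), B returns a count.

-- ===== PORT A =====
-- vowels = 'aeiou' (shared module constant; also cited by Pre_/Raises_)
def pvVowels : List Char := ['a', 'e', 'i', 'o', 'u']

-- condition of lastConsonant's loop: ((not letter in vowels) and (letter != 'y')) and letter.isalpha()
def pvConsP (c : Char) : Bool := (!decide (c ∈ pvVowels) && decide (c ≠ 'y')) && PySem.Chars.isalpha c
-- condition of lastVowel's loop: ((letter in vowels) and (letter != 'y')) and letter.isalpha()
def pvVowP (c : Char) : Bool := (decide (c ∈ pvVowels) && decide (c ≠ 'y')) && PySem.Chars.isalpha c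

-- 'for letter in rstr: if p(letter): return (rstr.index(letter)+1) * -1'  (None = none)
def pvScan (p : Char → Bool) (rstr : List Char) : List Char → Option Int
  | [] => none
  | c :: rest =>
    if p c then (PySem.List.index? rstr c).map (fun i => ((i : Int) + 1) * (-1))
    else pvScan p rstr rest

-- rstr = word[::-1] is the reverse (PySem.List.slice?_none_none_neg_one)
def lastConsonant (word : String) : Option Int :=
  pvScan pvConsP word.toList.reverse word.toList.reverse

def lastVowel (word : String) : Option Int :=
  pvScan pvVowP word.toList.reverse word.toList.reverse

-- 'y' in word (single-character substring test = membership of the char);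
-- word[k] via PySem.List.pyGet?; 'lastConsonant(word)+1' applied under Option.bind:
-- where the Python adds None+1 and raises TypeError the bind yields none (excluded by Pre_).
def sometimesY : List String → Int
  | [] => 0
  | w :: rest =>
    let s := w.toList
    if 'y' ∈ s then
      if !(s.any fun c => decide (c ∈ pvVowels)) then 1 + sometimesY rest
      else if PySem.List.pyGet? s (-1) = some 'y' then 1 + sometimesY rest
      else if PySem.List.pyGet? s 0 = some 'y' then sometimesY rest
      else if ((lastConsonant w).bind fun j => PySem.List.pyGet? s (j + 1)) = some 'y' then
        1 + sometimesY rest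
      else if ((lastVowel w).bind fun j => PySem.List.pyGet? s (j + 1)) = some 'y' then
        1 + sometimesY rest
      else sometimesY rest
    else sometimesY rest

-- ===== PORT B =====
def pvConsPB (c : Char) : Bool := PySem.Chars.isalpha c && !decide (c ∈ pvVowels) && decide (c ≠ 'y')

-- max((i for i, c in enumerate(word) if p(c)), default=None)
def pvLastIdx (p : Char → Bool) (s : List Char) : Option Int :=
  PySem.List.max? ((PySem.List.enumerate s).filterMap fun ic => if p ic.2 then some ic.1 else none)
    (fun x => x)

def pvCounts (word : String) : Bool :=
  let s := word.toList
  if !decide ('y' ∈ s) then false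
  else if !(s.any fun c => decide (c ∈ pvVowels)) then true
  else if PySem.List.pyGet? s (-1) = some 'y' then true
  else if PySem.List.pyGet? s 0 = some 'y' then false
  else if (match pvLastIdx pvConsPB s with
           | some j => decide (j + 1 < (s.length : Int)) && decide (PySem.List.pyGet? s (j + 1) = some 'y')
           | none => false) then true
  else
    match pvLastIdx (fun c => decide (c ∈ pvVowels)) s with
    | some j => decide (j + 1 < (s.length : Int)) && decide (PySem.List.pyGet? s (j + 1) = some 'y')
    | none => false

def sometimesY_alt (thisList : List String) : Int :=
  thisList.foldl (fun count w => if pvCounts w then count + 1 else count) 0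

-- ===== PRECONDITION & SPEC =====
-- the branch context in which A calls lastConsonant on a word
def pvNeedsCons (s : List Char) : Bool :=
  decide ('y' ∈ s) && (s.any fun c => decide (c ∈ pvVowels)) &&
    decide (PySem.List.pyGet? s (-1) ≠ some 'y') && decide (PySem.List.pyGet? s 0 ≠ some 'y')

-- Pre_ excludes exactly the lists with a word on which A's lastConsonant returns None, so that
-- 'lastConsonant(word)+1' raises TypeError in Python (every word in that branch context must
-- contain a non-'y' consonant).
def Pre_sometimesY (thisList : List String) : Prop :=
  (thisList.all fun w => !pvNeedsCons w.toList || w.toList.any pvConsP) = true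

instance (thisList : List String) : Decidable (Pre_sometimesY thisList) := by
  unfold Pre_sometimesY; infer_instance

def pvWitness_sometimesY : List String := ["byo", "fly", "stone", ""]

def Spec_sometimesY (thisList : List String) (out : Int) : Prop := out = sometimesY_alt thisList
instance (thisList : List String) (out : Int) : Decidable (Spec_sometimesY thisList out) := by
  unfold Spec_sometimesY; infer_instance

-- ===== CLAIM (what is proved, stated in full; the proofs are below) =====
def Claim_equal_sometimesY : Prop := ∀ (thisList : List String), Dom_sometimesY thisList →
  Pre_sometimesY thisList → Spec_sometimesY thisList (sometimesY thisList)

-- ===== LEMMAS AND PROOFS =====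

-- A's reversed scan-and-index loop computes -(i+1) for i the first index of rstr satisfying p.
theorem pvScan_eq (p : Char → Bool) :
    ∀ (l pref : List Char), (∀ x ∈ pref, p x = false) →
      pvScan p (pref ++ l) l = (List.findIdx? p (pref ++ l)).map (fun i => ((i : Int) + 1) * (-1)) := by
  intro l
  induction l with
  | nil =>
    intro pref h
    have h1 : List.findIdx? p pref = none := List.findIdx?_eq_none_iff.mpr h
    simp [pvScan, h1]
  | cons c rest ih =>
    intro pref h
    by_cases hc : p c = true
    · have hcn : c ∉ pref := fun hm => by simp [h c hm] at hc
      have hidx : PySem.List.index? (pref ++ c :: rest) c = some pref.length :=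
        (PySem.List.index?_eq_some_iff _ _ _).mpr ⟨pref, rest, rfl, rfl, hcn⟩
      have hf : List.findIdx? p (pref ++ c :: rest) = some pref.length := by
        rw [List.findIdx?_append, List.findIdx?_eq_none_iff.mpr h, List.findIdx?_cons, if_pos hc]
        simp
      show (if p c then (PySem.List.index? (pref ++ c :: rest) c).map (fun i => ((i : Int) + 1) * (-1))
            else pvScan p (pref ++ c :: rest) rest) = _
      rw [if_pos hc, hidx, hf]
    · have h' : ∀ x ∈ pref ++ [c], p x = false := by
        intro x hx
        rcases List.mem_append.mp hx with hx | hx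
        · exact h x hx
        · simp only [List.mem_singleton] at hx; subst hx; simpa using hc
      have := ih (pref ++ [c]) h'
      simpa [pvScan, hc, List.append_assoc] using this

-- B's forward max-index scan, expressed through the same first-index-of-the-reverse.
theorem pvIdx_mem (p : Char → Bool) (t : List Char) :
    ∀ x ∈ (PySem.List.enumerate t 0).filterMap (fun ic => if p ic.2 then some ic.1 else none),
      0 ≤ x ∧ x < (t.length : Int) := by
  intro x hx
  obtain ⟨ic, hic, hval⟩ := List.mem_filterMap.mp hx
  obtain ⟨k, hk, rfl⟩ := (PySem.List.mem_enumerate_iff _ _ _).mp hic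
  by_cases hp : p (t[k]) = true
  · rw [if_pos hp] at hval
    obtain rfl := Option.some.inj hval
    exact ⟨by show (0 : Int) ≤ 0 + (k : Int); omega, by show 0 + (k : Int) < (t.length : Int); omega⟩
  · simp [hp] at hval

theorem pvMax?_append (L : List Int) (m : Int) (h : ∀ x ∈ L, x < m) :
    PySem.List.max? (L ++ [m]) (fun y => y) = some m := by
  cases L with
  | nil => simp [PySem.List.max?_id_cons]
  | cons x l' =>
    rw [List.cons_append, PySem.List.max?_id_cons, List.foldl_append]
    have hlt : List.foldl max x l' < m := by
      rcases PySem.List.foldl_max_mem l' x with h1 | h1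
      · rw [h1]; exact h x (by simp)
      · exact h _ (by simp [h1])
    simp [max_eq_right hlt.le]

theorem pvLastIdx_eq (p : Char → Bool) (s : List Char) :
    pvLastIdx p s = (List.findIdx? p s.reverse).map (fun i => ((s.length - 1 - i : Nat) : Int)) := by
  induction s using List.reverseRecOn with
  | nil => simp [pvLastIdx, PySem.List.enumerate_nil, PySem.List.max?]
  | append_singleton t c ih =>
    by_cases hc : p c = true
    · have hsingle : List.filterMap (fun ic => if p ic.2 = true then some ic.1 else none)
          (PySem.List.enumerate [c] (0 + (t.length : Int))) = [0 + (t.length : Int)] := by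
        simp [PySem.List.enumerate_cons, PySem.List.enumerate_nil, hc]
      unfold pvLastIdx
      rw [PySem.List.enumerate_append, List.filterMap_append, hsingle,
        pvMax?_append _ _ (fun x hx => by have := (pvIdx_mem p t x hx).2; omega),
        List.reverse_append]
      simp [List.findIdx?_cons, hc]
    · have hnone : List.filterMap (fun ic => if p ic.2 = true then some ic.1 else none)
          (PySem.List.enumerate [c] (0 + (t.length : Int))) = [] := by
        simp [PySem.List.enumerate_cons, PySem.List.enumerate_nil, hc]
      unfold pvLastIdx at ih ⊢
      rw [PySem.List.enumerate_append, List.filterMap_append, hnone, List.append_nil, ih,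
        List.reverse_append]
      simp only [List.reverse_singleton, List.singleton_append, List.findIdx?_cons, hc,
        Bool.false_eq_true, if_false]
      cases hfi : List.findIdx? p t.reverse with
      | none => simp
      | some i =>
        simp only [Option.map_some, List.length_append, List.length_singleton]
        congr 1
        omega

-- the two last-consonant / last-vowel conditions agree when the word's first char is not 'y'
theorem pvCond_bridge (p : Char → Bool) (s : List Char)
    (h0 : PySem.List.pyGet? s 0 ≠ some 'y') :
    (((pvScan p s.reverse s.reverse).bind fun j => PySem.List.pyGet? s (j + 1)) = some 'y') ↔
      ((match pvLastIdx p s with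
        | some j => decide (j + 1 < (s.length : Int)) && decide (PySem.List.pyGet? s (j + 1) = some 'y')
        | none => false) = true) := by
  have hA := pvScan_eq p s.reverse [] (by simp)
  simp only [List.nil_append] at hA
  rw [hA, pvLastIdx_eq]
  cases hfi : List.findIdx? p s.reverse with
  | none => simp
  | some i =>
    have hi : i < s.length := by
      have := List.findIdx?_eq_some_iff_findIdx_eq.mp hfi
      simpa using this.1
    have harg : ((i : Int) + 1) * (-1) + 1 = -(i : Int) := by ring
    show PySem.List.pyGet? s (((i : Int) + 1) * (-1) + 1) = some 'y' ↔
      (decide (((s.length - 1 - i : Nat) : Int) + 1 < (s.length : Int)) &&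
        decide (PySem.List.pyGet? s (((s.length - 1 - i : Nat) : Int) + 1) = some 'y')) = true
    rw [harg]
    rcases Nat.eq_zero_or_pos i with rfl | hpos
    · have hlen1 : ((s.length - 1 - 0 : Nat) : Int) + 1 = (s.length : Int) := by omega
      simp [h0]
      exact fun hlt => absurd hlt (by omega)
    · have hget : PySem.List.pyGet? s (-(i : Int)) = s[s.length - i]? :=
        PySem.List.pyGet?_neg_natCast s i hpos hi.le
      have hsome : s[s.length - i]? = some (s[s.length - i]'(by omega)) :=
        List.getElem?_eq_getElem (by omega)
      have hj1 : ((s.length - 1 - i : Nat) : Int) + 1 = ((s.length - i : Nat) : Int) := by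
        omega
      have hjlt : ((s.length - i : Nat) : Int) < (s.length : Int) := by omega
      rw [hj1, PySem.List.pyGet?_natCast, hget, hsome]
      simp [hjlt]

theorem pvConsP_eq : pvConsPB = pvConsP := by
  funext c
  unfold pvConsPB pvConsP
  rcases Bool.eq_false_or_eq_true (PySem.Chars.isalpha c) with h | h <;> simp [h, Bool.and_comm]

theorem pvVowP_eq : (fun c => decide (c ∈ pvVowels)) = pvVowP := by
  funext c
  by_cases h : c ∈ pvVowels
  · have h1 : decide (c ≠ 'y') = true := by fin_cases h <;> rfl
    have h2 : PySem.Chars.isalpha c = true := by fin_cases h <;> rfl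
    simp [pvVowP, h, h1, h2]
  · simp [pvVowP, h]

theorem pvStep (w : String) (rest : List String) :
    sometimesY (w :: rest) = (if pvCounts w then 1 else 0) + sometimesY rest := by
  simp only [sometimesY, pvCounts, lastConsonant, lastVowel, pvConsP_eq, pvVowP_eq]
  by_cases h1 : 'y' ∈ w.toList
  · by_cases h2 : (w.toList.any pvVowP) = true
    · by_cases h3 : PySem.List.pyGet? w.toList (-1) = some 'y'
      · simp [h1, h2, h3]
      · by_cases h4 : PySem.List.pyGet? w.toList 0 = some 'y'
        · simp [h1, h2, h3, h4]
        · have hbc := pvCond_bridge pvConsP w.toList h4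
          have hbv := pvCond_bridge pvVowP w.toList h4
          simp only [hbc, hbv]
          simp [h1, h2, h3, h4]
          split_ifs <;> first | omega | tauto

    · simp [h1, h2]
  · simp [h1]

theorem pvAlt_eq (l : List String) : sometimesY_alt l = (List.countP pvCounts l : Int) := by
  unfold sometimesY_alt
  rw [PySem.List.foldl_if_add_one pvCounts l 0]
  simp

theorem pvMain (l : List String) : sometimesY l = sometimesY_alt l := by
  rw [pvAlt_eq]
  induction l with
  | nil => simp [sometimesY]
  | cons w rest ih =>
    rw [pvStep, ih, List.countP_cons]
    by_cases h : pvCounts w = true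
    · simp [h]
      omega
    · simp [h]

-- ===== VERDICT (by name: the statement is the Claim_ definition above) =====
theorem sometimesY_spec : Claim_equal_sometimesY := by
  intro l _ _
  unfold Spec_sometimesY
  exact pvMain l
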